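-- pv_equiv track=rewrite | github.com/BREADLuVER/Tech-OA-Practice | isSpecialSequence.py | isSpecialSequence
-- ===== SOURCE A (Python) =====
-- def isSpecialSequence(dna_sequence: str) -> str:
--     def can_form_palindrome(s, removal_allowed=True):
--         left, right = 0, len(s) - 1
--         while left < right:
--             if s[left] != s[right]:
--                 if not removal_allowed:
--                     return False
--                 return can_form_palindrome(s[left + 1:right + 1], False) or \
--                        can_form_palindrome(s[left:right], False)
--             left += 1
--             right -= 1
--         return True
--
--     for i in range(1, len(dna_sequence)):
--         left_part = dna_sequence[:i]
--         right_part = dna_sequence[i:]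
--
--         if can_form_palindrome(left_part) and can_form_palindrome(right_part, False):
--             return "YES"
--         if can_form_palindrome(left_part, False) and can_form_palindrome(right_part):
--             return "YES"
--
--     return "NO"
-- ===== SOURCE B (Python) =====
-- def isSpecialSequence(dna_sequence: str) -> str:
--     # Polynomial prefix encodings (base 131 > any ASCII code, exact big ints, no modulus):
--     # palindrome test of any segment is one integer comparison, and the first mismatched
--     # symmetric pair of a segment is found by binary search instead of a linear scan.
--     s = dna_sequence
--     n = len(s)
--     B = 131
--     pw = [1]
--     for _ in s:
--         pw.append(pw[-1] * B)
--     h = [0]                      # h[i] = code of s[:i]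
--     for c in s:
--         h.append(h[-1] * B + ord(c))
--     r = [0]                      # r[i] = code of reversed(s)[:i]
--     for c in reversed(s):
--         r.append(r[-1] * B + ord(c))
--
--     def fwd(a, b):               # code of s[a:b]
--         return h[b] - h[a] * pw[b - a]
--
--     def bwd(a, b):               # code of s[a:b] reversed
--         return r[n - a] - r[n - b] * pw[b - a]
--
--     def is_pal(a, b):
--         return fwd(a, b) == bwd(a, b)
--
--     def near(a, b):              # s[a:b] is a palindrome after deleting at most one char
--         m = b - a
--         lo, hi = 0, m // 2       # binary search: largest t whose first t symmetric pairs match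
--         while lo < hi:
--             mid = (lo + hi + 1) // 2
--             if fwd(a, a + mid) == bwd(b - mid, b):
--                 lo = mid
--             else:
--                 hi = mid - 1
--         if lo == m // 2:
--             return True
--         return is_pal(a + lo + 1, b - lo) or is_pal(a + lo, b - lo - 1)
--
--     for i in range(1, n):
--         if (near(0, i) and is_pal(i, n)) or (is_pal(0, i) and near(i, n)):
--             return "YES"
--     return "NO"
-- ===== Notes on version B (the rewrite author's own statement) =====
-- stated objective: alternative
-- what changed: Replaces per-split two-pointer/recursive palindrome scans by precomputed base-131 polynomial prefix encodings of the string and its reverse, so each palindrome test is one integer comparison and the first mismatched symmetric pair of a part is located by binary search instead of a linear scan.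
import Mathlib
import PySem

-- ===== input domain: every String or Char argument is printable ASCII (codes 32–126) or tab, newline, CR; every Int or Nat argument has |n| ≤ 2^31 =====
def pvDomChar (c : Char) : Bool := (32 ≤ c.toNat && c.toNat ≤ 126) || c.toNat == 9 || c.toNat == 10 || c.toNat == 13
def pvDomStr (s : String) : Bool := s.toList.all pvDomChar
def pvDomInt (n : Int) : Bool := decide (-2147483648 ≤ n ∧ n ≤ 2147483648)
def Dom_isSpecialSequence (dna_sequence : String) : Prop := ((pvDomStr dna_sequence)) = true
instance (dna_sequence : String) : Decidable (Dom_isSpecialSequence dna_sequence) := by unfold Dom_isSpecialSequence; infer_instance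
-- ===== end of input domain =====

-- B replaces the per-split two-pointer/recursive palindrome scans by base-131 polynomial
-- prefix encodings of the string and its reverse (exact integers, no modulus), so each
-- palindrome test is one integer comparison and the first mismatched symmetric pair is
-- found by binary search (objective: alternative algorithm; not measured faster).

-- ===== PORT A =====
-- termination lemmas for the ports (cited by name in decreasing_by; proved without
-- omega to keep the ports' definition closures small)
theorem pvDecGap (left right : Int) (h : left < right) :
    (right - 1 - (left + 1)).toNat < (right - left).toNat :=
  (Int.toNat_lt_toNat (Int.sub_pos.mpr h)).mpr
    (calc right - 1 - (left + 1) = right - left - 2 := by ring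
      _ < right - left := sub_lt_self _ zero_lt_two)

theorem pvDecMidGt (lo hi : Nat) (h : lo < hi) : lo < (lo + hi + 1) / 2 :=
  Nat.lt_of_lt_of_le (Nat.lt_succ_self lo)
    ((Nat.le_div_iff_mul_le (by decide)).mpr
      (calc (lo + 1) * 2 = lo + 1 + (lo + 1) := mul_two _
        _ ≤ lo + 1 + hi := Nat.add_le_add_left h _
        _ = lo + hi + 1 := by rw [Nat.add_assoc, Nat.add_comm 1 hi, ← Nat.add_assoc]))

theorem pvDecMidLe (lo hi : Nat) (h : lo < hi) : (lo + hi + 1) / 2 ≤ hi :=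
  (Nat.div_le_iff_le_mul_add_pred (by decide)).mpr
    (show lo + hi + 1 ≤ 2 * hi + 1 from
      Nat.add_le_add_right
        (calc lo + hi ≤ hi + hi := Nat.add_le_add_right (Nat.le_of_lt h) hi
          _ = 2 * hi := (Nat.two_mul hi).symm) 1)

theorem pvDecBS1 (lo hi : Nat) (h : lo < hi) : hi - (lo + hi + 1) / 2 < hi - lo :=
  Nat.sub_lt_sub_left h (pvDecMidGt lo hi h)

theorem pvDecBS2 (lo hi : Nat) (h : lo < hi) : (lo + hi + 1) / 2 - 1 - lo < hi - lo :=
  Nat.lt_of_le_of_lt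
    (Nat.sub_le_sub_right (Nat.sub_le_sub_right (pvDecMidLe lo hi h) 1) lo)
    (by rw [Nat.sub_sub, Nat.add_comm]
        exact Nat.sub_succ_lt_self hi lo h)

theorem pvDecLt (i n : Nat) (h : i < n) : n - (i + 1) < n - i := Nat.sub_succ_lt_self n i h


-- can_form_palindrome with removal_allowed=False: the two-pointer while loop
def pvCfpF (s : List Char) (left right : Int) : Bool :=
  if _h : left < right then
    if PySem.List.pyGet? s left ≠ PySem.List.pyGet? s right then false
    else pvCfpF s (left + 1) (right - 1)
  else true
termination_by (right - left).toNat
decreasing_by exact pvDecGap left right _h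

def pvCfpFalse (s : List Char) : Bool := pvCfpF s 0 ((s.length : Int) - 1)

-- can_form_palindrome with removal_allowed=True: same loop, recursive calls on mismatch
def pvCfpT (s : List Char) (left right : Int) : Bool :=
  if _h : left < right then
    if PySem.List.pyGet? s left ≠ PySem.List.pyGet? s right then
      pvCfpFalse (PySem.List.slice s (some (left + 1)) (some (right + 1))) ||
      pvCfpFalse (PySem.List.slice s (some left) (some right))
    else pvCfpT s (left + 1) (right - 1)
  else true
termination_by (right - left).toNat
decreasing_by exact pvDecGap left right _h

def pvCfpTrue (s : List Char) : Bool := pvCfpT s 0 ((s.length : Int) - 1)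

-- for i in range(1, len(dna_sequence)): … with early return
def pvAGo (l : List Char) (is : List Int) : String :=
  match is with
  | [] => "NO"
  | i :: rest =>
    let left_part := PySem.List.slice l none (some i)
    let right_part := PySem.List.slice l (some i) none
    if pvCfpTrue left_part && pvCfpFalse right_part then "YES"
    else if pvCfpFalse left_part && pvCfpTrue right_part then "YES"
    else pvAGo l rest

def isSpecialSequence (dna_sequence : String) : String :=
  pvAGo dna_sequence.toList (PySem.List.pyRange 1 dna_sequence.toList.length 1)

-- ===== PORT B =====
-- fwd(a,b): code of s[a:b] from the prefix-code array h and the power array pw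
def pvFwd (h pw : List Int) (a b : Nat) : Int := h.getD b 0 - h.getD a 0 * pw.getD (b - a) 0

-- bwd(a,b): code of s[a:b] reversed, from the prefix-code array r of reversed(s)
def pvBwd (r pw : List Int) (n a b : Nat) : Int :=
  r.getD (n - a) 0 - r.getD (n - b) 0 * pw.getD (b - a) 0

-- is_pal(a,b)
def pvPalC (h r pw : List Int) (n a b : Nat) : Bool := pvFwd h pw a b == pvBwd r pw n a b

-- the while-loop binary search: largest t in [lo,hi] with p t (p monotone downward)
def pvBS (p : Nat → Bool) (lo hi : Nat) : Nat :=
  if _h : lo < hi then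
    if p ((lo + hi + 1) / 2) then pvBS p ((lo + hi + 1) / 2) hi
    else pvBS p lo ((lo + hi + 1) / 2 - 1)
  else lo
termination_by hi - lo
decreasing_by
  · exact pvDecBS1 lo hi _h
  · exact pvDecBS2 lo hi _h

-- near(a,b)
def pvNearC (h r pw : List Int) (n a b : Nat) : Bool :=
  let m := b - a
  let lo := pvBS (fun t => pvFwd h pw a (a + t) == pvBwd r pw n (b - t) b) 0 (m / 2)
  if lo == m / 2 then true
  else pvPalC h r pw n (a + lo + 1) (b - lo) || pvPalC h r pw n (a + lo) (b - lo - 1)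

-- for i in range(1, n): … with early return
def pvBLoop (h r pw : List Int) (n i : Nat) : String :=
  if _h : i < n then
    if (pvNearC h r pw n 0 i && pvPalC h r pw n i n) ||
       (pvPalC h r pw n 0 i && pvNearC h r pw n i n) then "YES"
    else pvBLoop h r pw n (i + 1)
  else "NO"
termination_by n - i
decreasing_by exact pvDecLt i n _h

-- the three accumulate loops 'x=[v]; for c in …: x.append(f(x[-1],c))' are List.scanl
def isSpecialSequence_alt (dna_sequence : String) : String :=
  let l := dna_sequence.toList
  let n := l.length
  let pw := List.scanl (fun p (_ : Char) => p * 131) (1 : Int) l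
  let h := List.scanl (fun a c => a * 131 + (c.toNat : Int)) (0 : Int) l
  let r := List.scanl (fun a c => a * 131 + (c.toNat : Int)) (0 : Int) l.reverse
  pvBLoop h r pw n 1

-- ===== PRECONDITION & SPEC =====
def Spec_isSpecialSequence (dna_sequence : String) (out : String) : Prop := out = isSpecialSequence_alt dna_sequence
instance (dna_sequence : String) (out : String) : Decidable (Spec_isSpecialSequence dna_sequence out) := by unfold Spec_isSpecialSequence; infer_instance

-- ===== CLAIM (what is proved, stated in full; the proofs are below) =====
def Claim_equal_isSpecialSequence : Prop := ∀ (dna_sequence : String), Dom_isSpecialSequence dna_sequence → Spec_isSpecialSequence dna_sequence (isSpecialSequence dna_sequence)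

-- ===== LEMMAS AND PROOFS =====

-- reference functions both sides are reduced to
def pvIsPal (t : List Char) : Bool := t == t.reverse

def pvNearGo (t : List Char) (m j : Nat) : Bool :=
  if _h : j < m / 2 then
    if t[j]? ≠ t[m - 1 - j]? then
      pvIsPal ((t.drop (j + 1)).take (m - j - (j + 1))) ||
      pvIsPal ((t.drop j).take (m - j - 1 - j))
    else pvNearGo t m (j + 1)
  else true
termination_by m / 2 - j

def encI (t : List Char) : Int := t.foldl (fun a c => a * 131 + (c.toNat : Int)) 0

def seg (l : List Char) (a b : Nat) : List Char := (l.drop a).take (b - a)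

theorem foldl_shift (u : List Char) (a : Int) :
    u.foldl (fun x c => x * 131 + (c.toNat : Int)) a = a * 131 ^ u.length + encI u := by
  induction u generalizing a with
  | nil => simp [encI]
  | cons c t ih =>
    have h2 : encI (c :: t) = ((0:Int) * 131 + (c.toNat : Int)) * 131 ^ t.length + encI t := by
      show List.foldl (fun x c => x * 131 + (c.toNat : Int)) 0 (c :: t) = _
      rw [List.foldl_cons, ih]
    rw [List.foldl_cons, ih, h2, List.length_cons]
    ring


theorem encI_cons (c : Char) (t : List Char) :
    encI (c :: t) = (c.toNat : Int) * 131 ^ t.length + encI t := by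
  show List.foldl (fun a c => a * 131 + (c.toNat : Int)) 0 (c :: t) = _
  rw [List.foldl_cons, foldl_shift]
  ring


theorem encI_bound (u : List Char) (hb : ∀ c ∈ u, c.toNat ≤ 126) :
    0 ≤ encI u ∧ encI u < 131 ^ u.length := by
  induction u with
  | nil => simp [encI]
  | cons c t ih =>
    have hc : c.toNat ≤ 126 := hb c (by simp)
    have ht := ih (fun d hd => hb d (by simp [hd]))
    rw [encI_cons]
    have hpow : (0:Int) < 131 ^ t.length := by positivity
    constructor
    · nlinarith [ht.1, hpow]
    · have : (c.toNat : Int) ≤ 130 := by exact_mod_cast Nat.le_trans hc (by norm_num)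
      calc (c.toNat : Int) * 131 ^ t.length + encI t
          < (c.toNat : Int) * 131 ^ t.length + 131 ^ t.length := by linarith [ht.2]
        _ = ((c.toNat : Int) + 1) * 131 ^ t.length := by ring
        _ ≤ 131 * 131 ^ t.length := by nlinarith
        _ = 131 ^ (c :: t).length := by rw [List.length_cons]; ring


theorem encI_inj (u v : List Char) (hl : u.length = v.length)
    (hu : ∀ c ∈ u, c.toNat ≤ 126) (hv : ∀ c ∈ v, c.toNat ≤ 126)
    (he : encI u = encI v) : u = v := by
  induction u generalizing v with
  | nil => cases v with
    | nil => rfl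
    | cons d w => simp at hl
  | cons c t ih =>
    cases v with
    | nil => simp at hl
    | cons d w =>
      have hlw : t.length = w.length := by simpa using hl
      rw [encI_cons, encI_cons] at he
      have hbt := encI_bound t (fun x hx => hu x (by simp [hx]))
      have hbw := encI_bound w (fun x hx => hv x (by simp [hx]))
      rw [← hlw] at hbw
      have hpow : (0:Int) < 131 ^ t.length := by positivity
      rw [← hlw] at he
      have hcd : (c.toNat : Int) = d.toNat := by nlinarith [hbt.1, hbt.2, hbw.1, hbw.2]
      have hcd' : c.toNat = d.toNat := by exact_mod_cast hcd
      have hchar : c = d := Char.ext (UInt32.toNat_inj.mp hcd')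
      subst hchar
      have henc : encI t = encI w := by
        have : (c.toNat : Int) * 131 ^ t.length + encI t = (c.toNat : Int) * 131 ^ t.length + encI w := he
        linarith
      rw [ih w hlw (fun x hx => hu x (by simp [hx])) (fun x hx => hv x (by simp [hx])) henc]


theorem scanl_getD (f : Int → Char → Int) (a : Int) (l : List Char) (i : Nat)
    (hi : i ≤ l.length) : (List.scanl f a l).getD i 0 = (l.take i).foldl f a := by
  induction l generalizing a i with
  | nil =>
    have : i = 0 := by simpa using hi
    subst this
    simp [List.scanl]
  | cons c t ih =>
    cases i with
    | zero => simp [List.scanl_cons]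
    | succ j =>
      simp only [List.scanl_cons, List.getD_cons_succ, List.take_succ_cons, List.foldl_cons]
      exact ih (f a c) j (by simpa using hi)


theorem pw_getD (l : List Char) (k : Nat) (hk : k ≤ l.length) :
    (List.scanl (fun p (_ : Char) => p * 131) (1 : Int) l).getD k 0 = 131 ^ k := by
  rw [scanl_getD _ _ _ _ hk]
  have : ∀ (u : List Char) (a : Int), u.foldl (fun p _ => p * 131) a = a * 131 ^ u.length := by
    intro u
    induction u with
    | nil => simp
    | cons c t ih => intro a; simp only [List.foldl_cons, ih, List.length_cons]; ring
  rw [this]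
  rw [List.length_take, Nat.min_eq_left hk]
  ring


theorem h_getD (l : List Char) (b : Nat) (hb : b ≤ l.length) :
    (List.scanl (fun a c => a * 131 + (c.toNat : Int)) (0 : Int) l).getD b 0 = encI (l.take b) := by
  rw [scanl_getD _ _ _ _ hb]
  rfl


theorem seg_length (l : List Char) (a b : Nat) (hab : a ≤ b) (hb : b ≤ l.length) :
    (seg l a b).length = b - a := by
  simp only [seg, List.length_take, List.length_drop]
  omega

theorem enc_diff (u : List Char) (x y : Nat) (hxy : x ≤ y) (hy : y ≤ u.length) :
    encI (u.take y) - encI (u.take x) * 131 ^ (y - x) = encI (seg u x y) := by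
  have hsplit : u.take y = u.take x ++ seg u x y := by
    conv_lhs => rw [show y = x + (y - x) by omega]
    rw [List.take_add]
    rfl
  rw [hsplit]
  have hlen : (seg u x y).length = y - x := seg_length u x y hxy hy
  have : encI (u.take x ++ seg u x y) = encI (u.take x) * 131 ^ (y - x) + encI (seg u x y) := by
    simp only [encI, List.foldl_append]
    rw [foldl_shift, hlen]
    rfl
  rw [this]
  ring


theorem fwd_eq (l : List Char) (a b : Nat) (hab : a ≤ b) (hb : b ≤ l.length) :
    pvFwd (List.scanl (fun a c => a * 131 + (c.toNat : Int)) (0 : Int) l)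
      (List.scanl (fun p (_ : Char) => p * 131) (1 : Int) l) a b = encI (seg l a b) := by
  unfold pvFwd
  rw [h_getD l b hb, h_getD l a (le_trans hab hb), pw_getD l (b - a) (by omega)]
  exact enc_diff l a b hab hb


theorem seg_reverse (l : List Char) (a b : Nat) (hab : a ≤ b) (hb : b ≤ l.length) :
    seg l.reverse (l.length - b) (l.length - a) = (seg l a b).reverse := by
  have hd : (l.length - a) - (l.length - b) = b - a := by omega
  have h1 : l.reverse.drop (l.length - b) = (l.take b).reverse := by
    rw [List.drop_reverse, show l.length - (l.length - b) = b by omega]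
  have h2 : ((l.take b).reverse).take (b - a) = ((l.take b).drop a).reverse := by
    rw [List.take_reverse, List.length_take, Nat.min_eq_left hb,
        show b - (b - a) = a by omega]
  show (l.reverse.drop (l.length - b)).take ((l.length - a) - (l.length - b)) = _
  rw [hd, h1, h2, List.drop_take]
  rfl


theorem bwd_eq (l : List Char) (a b : Nat) (hab : a ≤ b) (hb : b ≤ l.length) :
    pvBwd (List.scanl (fun a c => a * 131 + (c.toNat : Int)) (0 : Int) l.reverse)
      (List.scanl (fun p (_ : Char) => p * 131) (1 : Int) l) l.length a b
      = encI ((seg l a b).reverse) := by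
  unfold pvBwd
  rw [h_getD l.reverse (l.length - a) (by rw [List.length_reverse]; omega),
      h_getD l.reverse (l.length - b) (by rw [List.length_reverse]; omega),
      pw_getD l (b - a) (by omega)]
  have hd : (l.length - a) - (l.length - b) = b - a := by omega
  have := enc_diff l.reverse (l.length - b) (l.length - a) (by omega)
    (by rw [List.length_reverse]; omega)
  rw [hd] at this
  rw [this, seg_reverse l a b hab hb]



theorem seg_bounded (l : List Char) (a b : Nat) (hl : ∀ c ∈ l, c.toNat ≤ 126) :
    ∀ c ∈ seg l a b, c.toNat ≤ 126 := by
  intro c hc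
  exact hl c (List.mem_of_mem_drop (List.mem_of_mem_take hc))


theorem palC_eq (l : List Char) (a b : Nat) (hab : a ≤ b) (hb : b ≤ l.length)
    (hl : ∀ c ∈ l, c.toNat ≤ 126) :
    pvPalC (List.scanl (fun a c => a * 131 + (c.toNat : Int)) (0 : Int) l)
      (List.scanl (fun a c => a * 131 + (c.toNat : Int)) (0 : Int) l.reverse)
      (List.scanl (fun p (_ : Char) => p * 131) (1 : Int) l) l.length a b
      = pvIsPal (seg l a b) := by
  unfold pvPalC pvIsPal
  rw [fwd_eq l a b hab hb, bwd_eq l a b hab hb]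
  have hbnd := seg_bounded l a b hl
  have hbnd2 : ∀ c ∈ (seg l a b).reverse, c.toNat ≤ 126 :=
    fun c hc => hbnd c (List.mem_reverse.mp hc)
  rw [Bool.eq_iff_iff, beq_iff_eq, beq_iff_eq]
  constructor
  · intro he
    exact encI_inj _ _ (by rw [List.length_reverse]) hbnd hbnd2 he
  · intro he
    conv_lhs => rw [he]


theorem seg_getElem? (l : List Char) (a b j : Nat) (hj : j < b - a) :
    (seg l a b)[j]? = l[a + j]? := by
  simp only [seg, List.getElem?_take, List.getElem?_drop]
  rw [if_pos hj]


theorem match_iff (l : List Char) (a b t : Nat) (hab : a ≤ b) (ht : 2 * t ≤ b - a) (hb : b ≤ l.length)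
    (hl : ∀ c ∈ l, c.toNat ≤ 126) :
    ((pvFwd (List.scanl (fun a c => a * 131 + (c.toNat : Int)) (0 : Int) l)
        (List.scanl (fun p (_ : Char) => p * 131) (1 : Int) l) a (a + t)
      == pvBwd (List.scanl (fun a c => a * 131 + (c.toNat : Int)) (0 : Int) l.reverse)
        (List.scanl (fun p (_ : Char) => p * 131) (1 : Int) l) l.length (b - t) b) = true
     ↔ ∀ j < t, l[a + j]? = l[b - 1 - j]?) := by
  have hta : t ≤ b - a := by omega
  have hlen1 : (seg l a (a + t)).length = t := by
    rw [seg_length l a (a + t) (by omega) (by omega)]; omega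
  have hlen2 : (seg l (b - t) b).length = t := by
    rw [seg_length l (b - t) b (by omega) hb]; omega
  have hchar : seg l a (a + t) = (seg l (b - t) b).reverse ↔
      ∀ j < t, l[a + j]? = l[b - 1 - j]? := by
    constructor
    · intro he j hj
      have e1 := congrArg (fun u => u[j]?) he
      simp only at e1
      rw [seg_getElem? l a (a + t) j (by omega)] at e1
      rw [List.getElem?_reverse (by rw [hlen2]; omega), hlen2] at e1
      rw [seg_getElem? l (b - t) b (t - 1 - j) (by omega)] at e1
      rw [show b - t + (t - 1 - j) = b - 1 - j by omega] at e1
      exact e1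
    · intro hp
      apply List.ext_getElem?
      intro j
      by_cases hj : j < t
      · rw [seg_getElem? l a (a + t) j (by omega),
            List.getElem?_reverse (by rw [hlen2]; omega), hlen2,
            seg_getElem? l (b - t) b (t - 1 - j) (by omega),
            show b - t + (t - 1 - j) = b - 1 - j by omega]
        exact hp j hj
      · rw [List.getElem?_eq_none (by rw [hlen1]; omega),
            List.getElem?_eq_none (by rw [List.length_reverse, hlen2]; omega)]
  rw [fwd_eq l a (a + t) (by omega) (by omega), bwd_eq l (b - t) b (by omega) hb,
      beq_iff_eq]
  constructor
  · intro he
    exact hchar.mp (encI_inj _ _ (by rw [hlen1, List.length_reverse, hlen2])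
      (seg_bounded l a (a + t) hl)
      (fun c hc => seg_bounded l (b - t) b hl c (List.mem_reverse.mp hc)) he)
  · intro hp
    rw [hchar.mpr hp]


theorem pvBS_spec (p : Nat → Bool) (lo hi : Nat) (hle : lo ≤ hi) (hp : p lo = true)
    (hmono : ∀ s t, lo ≤ s → s ≤ t → t ≤ hi → p t = true → p s = true) :
    lo ≤ pvBS p lo hi ∧ pvBS p lo hi ≤ hi ∧ p (pvBS p lo hi) = true ∧
      ∀ t, pvBS p lo hi < t → t ≤ hi → p t = false := by
  rw [pvBS]
  by_cases h : lo < hi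
  · rw [dif_pos h]
    by_cases hm : p ((lo + hi + 1) / 2) = true
    · rw [if_pos hm]
      have ih := pvBS_spec p ((lo + hi + 1) / 2) hi (by omega) hm
        (fun s t hs hst hthi => hmono s t (by omega) hst hthi)
      exact ⟨by omega, ih.2.1, ih.2.2.1, ih.2.2.2⟩
    · rw [if_neg hm]
      have ih := pvBS_spec p lo ((lo + hi + 1) / 2 - 1) (by omega) hp
        (fun s t hs hst ht => hmono s t hs hst (by omega))
      refine ⟨ih.1, by have := ih.2.1; omega, ih.2.2.1, ?_⟩
      intro t hrt hthi
      by_cases htm : t ≤ (lo + hi + 1) / 2 - 1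
      · exact ih.2.2.2 t hrt htm
      · cases hpt : p t with
        | false => rfl
        | true =>
          exact absurd (hmono ((lo + hi + 1) / 2) t (by omega) (by omega) hthi hpt)
            (by simpa using hm)
  · rw [dif_neg h]
    exact ⟨le_refl _, hle, hp, fun t h1 h2 => absurd h1 (by omega)⟩
termination_by hi - lo
decreasing_by all_goals omega


theorem nearGo_all (t : List Char) (m j0 : Nat)
    (h : ∀ j, j0 ≤ j → j < m / 2 → t[j]? = t[m - 1 - j]?) :
    pvNearGo t m j0 = true := by
  rw [pvNearGo]
  by_cases hj : j0 < m / 2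
  · rw [dif_pos hj, if_neg (not_not_intro (h j0 le_rfl hj))]
    exact nearGo_all t m (j0 + 1) (fun j hj1 hj2 => h j (by omega) hj2)
  · rw [dif_neg hj]
termination_by m / 2 - j0
decreasing_by omega


theorem nearGo_mis (t : List Char) (m j0 f : Nat) (hj : j0 ≤ f) (hf : f < m / 2)
    (hok : ∀ j, j0 ≤ j → j < f → t[j]? = t[m - 1 - j]?) (hmis : t[f]? ≠ t[m - 1 - f]?) :
    pvNearGo t m j0 = (pvIsPal ((t.drop (f + 1)).take (m - f - (f + 1))) ||
                       pvIsPal ((t.drop f).take (m - f - 1 - f))) := by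
  rw [pvNearGo, dif_pos (by omega : j0 < m / 2)]
  by_cases hj : j0 = f
  · subst hj
    rw [if_pos hmis]
  · rw [if_neg (not_not_intro (hok j0 le_rfl (by omega)))]
    exact nearGo_mis t m (j0 + 1) f (by omega) hf (fun j h1 h2 => hok j (by omega) h2) hmis
termination_by f - j0
decreasing_by omega


theorem seg_inner1 (l : List Char) (a b j : Nat) (hab : a ≤ b) (_h2 : 2 * j + 2 ≤ b - a) :
    ((seg l a b).drop (j + 1)).take ((b - a) - j - (j + 1)) = seg l (a + j + 1) (b - j) := by
  unfold seg
  rw [List.drop_take, List.drop_drop, List.take_take]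
  rw [show a + (j + 1) = a + j + 1 by omega]
  congr 1
  omega

theorem seg_inner2 (l : List Char) (a b j : Nat) (hab : a ≤ b) (_h2 : 2 * j + 2 ≤ b - a) :
    ((seg l a b).drop j).take ((b - a) - j - 1 - j) = seg l (a + j) (b - j - 1) := by
  unfold seg
  rw [List.drop_take, List.drop_drop, List.take_take]
  congr 1
  omega

theorem nearC_eq (l : List Char) (a b : Nat) (hab : a ≤ b) (hb : b ≤ l.length)
    (hl : ∀ c ∈ l, c.toNat ≤ 126) :
    pvNearC (List.scanl (fun a c => a * 131 + (c.toNat : Int)) (0 : Int) l)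
      (List.scanl (fun a c => a * 131 + (c.toNat : Int)) (0 : Int) l.reverse)
      (List.scanl (fun p (_ : Char) => p * 131) (1 : Int) l) l.length a b
      = pvNearGo (seg l a b) (b - a) 0 := by
  have hn := hb
  simp only [pvNearC]
  obtain ⟨h0, hhi, hpr, hmax⟩ := pvBS_spec
    (fun t => pvFwd (List.scanl (fun a c => a * 131 + (c.toNat : Int)) (0 : Int) l)
        (List.scanl (fun p (_ : Char) => p * 131) (1 : Int) l) a (a + t)
      == pvBwd (List.scanl (fun a c => a * 131 + (c.toNat : Int)) (0 : Int) l.reverse)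
        (List.scanl (fun p (_ : Char) => p * 131) (1 : Int) l) l.length (b - t) b)
    0 ((b - a) / 2) (by omega)
    ((match_iff l a b 0 hab (by omega) hb hl).mpr (fun j hj => absurd hj (by omega)))
    (fun s t hs hst hthi hpt =>
      (match_iff l a b s hab (by omega) hb hl).mpr
        (fun j hj => (match_iff l a b t hab (by omega) hb hl).mp hpt j (by omega)))
  set r := pvBS
    (fun t => pvFwd (List.scanl (fun a c => a * 131 + (c.toNat : Int)) (0 : Int) l)
        (List.scanl (fun p (_ : Char) => p * 131) (1 : Int) l) a (a + t)
      == pvBwd (List.scanl (fun a c => a * 131 + (c.toNat : Int)) (0 : Int) l.reverse)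
        (List.scanl (fun p (_ : Char) => p * 131) (1 : Int) l) l.length (b - t) b)
    0 ((b - a) / 2) with hrdef
  have hPr := (match_iff l a b r hab (by omega) hb hl).mp hpr
  by_cases hr : r = (b - a) / 2
  · rw [if_pos (by simp [hr])]
    symm
    apply nearGo_all
    intro j hj0 hjm
    rw [seg_getElem? l a b j (by omega), seg_getElem? l a b ((b - a) - 1 - j) (by omega),
        show a + ((b - a) - 1 - j) = b - 1 - j by omega]
    exact hPr j (by omega)
  · have hrlt : r < (b - a) / 2 := by omega
    have hnot : ¬ (l[a + r]? = l[b - 1 - r]?) := by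
      intro hEq
      have hfalse := hmax (r + 1) (by omega) (by omega)
      have htrue := (match_iff l a b (r + 1) hab (by omega) hb hl).mpr
        (fun j hj => by
          rcases Nat.lt_succ_iff_lt_or_eq.mp hj with h | h
          · exact hPr j h
          · subst h; exact hEq)
      rw [htrue] at hfalse
      simp at hfalse
    rw [if_neg (by simp [hr])]
    rw [nearGo_mis (seg l a b) (b - a) 0 r (by omega) hrlt
        (fun j h1 h2 => by
          rw [seg_getElem? l a b j (by omega),
              seg_getElem? l a b ((b - a) - 1 - j) (by omega),
              show a + ((b - a) - 1 - j) = b - 1 - j by omega]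
          exact hPr j h2)
        (by
          rw [seg_getElem? l a b r (by omega),
              seg_getElem? l a b ((b - a) - 1 - r) (by omega),
              show a + ((b - a) - 1 - r) = b - 1 - r by omega]
          exact hnot)]
    rw [palC_eq l (a + r + 1) (b - r) (by omega) (by omega) hl,
        palC_eq l (a + r) (b - r - 1) (by omega) (by omega) hl,
        seg_inner1 l a b r hab (by omega), seg_inner2 l a b r hab (by omega)]


-- ===== A-side characterization (two-pointer loops = pvIsPal / pvNearGo) =====

theorem pvCfpF_char (l : List Char) (j : Nat) :
    pvCfpF l (j : Int) ((l.length : Int) - 1 - j) = true ↔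
      (∀ i : Nat, j ≤ i → 2 * i + 1 < l.length → l[i]? = l[l.length - 1 - i]?) := by
  rw [pvCfpF]
  by_cases h : (j : Int) < (l.length : Int) - 1 - j
  · rw [dif_pos h]
    have hc : ((l.length : Int) - 1 - j) = ((l.length - 1 - j : Nat) : Int) := by omega
    rw [hc, PySem.List.pyGet?_natCast, PySem.List.pyGet?_natCast]
    by_cases hm : l[j]? = l[l.length - 1 - j]?
    · rw [if_neg (by simpa using hm)]
      have hc2 : ((j : Int) + 1) = ((j + 1 : Nat) : Int) := by push_cast; ring
      have hc3 : ((l.length - 1 - j : Nat) : Int) - 1 = (l.length : Int) - 1 - (j + 1 : Nat) := by omega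
      rw [hc2, hc3, pvCfpF_char l (j + 1)]
      constructor
      · intro hall i hji hi
        rcases Nat.eq_or_lt_of_le hji with rfl | hlt
        · exact hm
        · exact hall i hlt hi
      · exact fun hall i hji hi => hall i (by omega) hi
    · rw [if_pos (by simpa using hm)]
      simp only [Bool.false_eq_true, false_iff]
      intro hall
      exact hm (hall j le_rfl (by omega))
  · rw [dif_neg h]
    simp only [true_iff]
    intro i hji hi
    omega
termination_by l.length - j
decreasing_by omega


theorem pvIsPal_char (l : List Char) :
    pvIsPal l = true ↔ (∀ i : Nat, 2 * i + 1 < l.length → l[i]? = l[l.length - 1 - i]?) := by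
  unfold pvIsPal
  rw [beq_iff_eq]
  constructor
  · intro hpal i hi
    conv_lhs => rw [hpal]
    rw [List.getElem?_reverse (by omega)]
  · intro hall
    apply List.ext_getElem?
    intro i
    by_cases hi : i < l.length
    · rw [List.getElem?_reverse hi]
      by_cases h2 : 2 * i + 1 < l.length
      · exact hall i h2
      · by_cases heq : i = l.length - 1 - i
        · rw [← heq]
        · have := hall (l.length - 1 - i) (by omega)
          rw [this]
          congr 1
          omega
    · rw [List.getElem?_eq_none (by omega), List.getElem?_eq_none (by simp; omega)]


theorem cfpFalse_eq_isPal (l : List Char) : pvCfpFalse l = pvIsPal l := by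
  rw [Bool.eq_iff_iff, pvIsPal_char]
  unfold pvCfpFalse
  have h := pvCfpF_char l 0
  push_cast [sub_zero] at h
  rw [h]
  constructor
  · exact fun hall i hi => hall i (Nat.zero_le i) hi
  · exact fun hall i _ hi => hall i hi


theorem cfpT_eq_nearGo (l : List Char) (j : Nat) :
    pvCfpT l (j : Int) ((l.length : Int) - 1 - j) = pvNearGo l l.length j := by
  rw [pvCfpT, pvNearGo]
  have hiff : ((j : Int) < (l.length : Int) - 1 - j) ↔ j < l.length / 2 := by omega
  by_cases h : j < l.length / 2
  · rw [dif_pos (hiff.mpr h), dif_pos h]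
    have hc : ((l.length : Int) - 1 - j) = ((l.length - 1 - j : Nat) : Int) := by omega
    rw [hc, PySem.List.pyGet?_natCast, PySem.List.pyGet?_natCast]
    by_cases hm : l[j]? = l[l.length - 1 - j]?
    · rw [if_neg (by simpa using hm), if_neg (by simpa using hm)]
      have hc2 : ((j : Int) + 1) = ((j + 1 : Nat) : Int) := by push_cast; ring
      have hc3 : ((l.length - 1 - j : Nat) : Int) - 1 = (l.length : Int) - 1 - (j + 1 : Nat) := by omega
      rw [hc2, hc3]
      exact cfpT_eq_nearGo l (j + 1)
    · rw [if_pos (by simpa using hm), if_pos (by simpa using hm)]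
      have hb1 : ((l.length - 1 - j : Nat) : Int) + 1 = ((l.length - j : Nat) : Int) := by omega
      have hc2 : ((j : Int) + 1) = ((j + 1 : Nat) : Int) := by push_cast; ring
      rw [hb1, hc2, PySem.List.slice_natCast, PySem.List.slice_natCast,
        cfpFalse_eq_isPal, cfpFalse_eq_isPal]
      have he : l.length - 1 - j - j = l.length - j - 1 - j := by omega
      rw [he]
  · rw [dif_neg (fun hh => h (hiff.mp hh)), dif_neg h]
termination_by l.length - j
decreasing_by omega


theorem cfpTrue_eq_nearGo (l : List Char) : pvCfpTrue l = pvNearGo l l.length 0 := by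
  unfold pvCfpTrue
  have h := cfpT_eq_nearGo l 0
  push_cast [sub_zero] at h
  exact h


-- ===== the split loops agree =====

theorem loop_eq (l : List Char) (i : Nat) (hl : ∀ c ∈ l, c.toNat ≤ 126) :
    pvAGo l (PySem.List.pyRange i l.length 1) =
      pvBLoop (List.scanl (fun a c => a * 131 + (c.toNat : Int)) (0 : Int) l)
        (List.scanl (fun a c => a * 131 + (c.toNat : Int)) (0 : Int) l.reverse)
        (List.scanl (fun p (_ : Char) => p * 131) (1 : Int) l) l.length i := by
  rw [pvBLoop]
  by_cases h : i < l.length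
  · rw [PySem.List.pyRange_one_cons (by exact_mod_cast h), dif_pos h, pvAGo]
    simp only [PySem.List.slice_to_natCast, PySem.List.slice_from_natCast,
      cfpTrue_eq_nearGo, cfpFalse_eq_isPal]
    rw [nearC_eq l 0 i (by omega) (le_of_lt h) hl,
        palC_eq l i l.length (le_of_lt h) le_rfl hl,
        palC_eq l 0 i (by omega) (le_of_lt h) hl,
        nearC_eq l i l.length (le_of_lt h) le_rfl hl]
    have hseg1 : seg l 0 i = l.take i := by simp [seg]
    have hseg2 : seg l i l.length = l.drop i := by
      unfold seg
      exact List.take_of_length_le (by rw [List.length_drop])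
    have hlen1 : (l.take i).length = i := by
      rw [List.length_take, Nat.min_eq_left (le_of_lt h)]
    have hlen2 : (l.drop i).length = l.length - i := List.length_drop
    rw [hseg1, hseg2, hlen1, hlen2, show i - 0 = i by omega]
    have hc2 : ((i : Int) + 1) = ((i + 1 : Nat) : Int) := by push_cast; ring
    rw [hc2, loop_eq l (i + 1) hl]
    by_cases h1 : (pvNearGo (l.take i) i 0 && pvIsPal (l.drop i)) = true
    · simp [h1]
    · by_cases h2 : (pvIsPal (l.take i) && pvNearGo (l.drop i) (l.length - i) 0) = true
      · simp [h1, h2]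
      · simp [h1, h2]
  · rw [PySem.List.pyRange_one_eq_nil (by exact_mod_cast Nat.le_of_not_lt h), dif_neg h, pvAGo]
termination_by l.length - i
decreasing_by omega


theorem dom_bound (s : String) (h : pvDomStr s = true) : ∀ c ∈ s.toList, c.toNat ≤ 126 := by
  intro c hc
  have := (List.all_eq_true.mp h) c hc
  simp only [pvDomChar, Bool.or_eq_true, Bool.and_eq_true, decide_eq_true_eq, beq_iff_eq] at this
  omega


-- ===== VERDICT (by name: the statement is the Claim_ definition above) =====
theorem isSpecialSequence_spec : Claim_equal_isSpecialSequence := by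
  intro s hdom
  show _ = _
  unfold isSpecialSequence isSpecialSequence_alt
  exact loop_eq s.toList 1 (dom_bound s hdom)
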